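-- pv_equiv track=rewrite | github.com/QBoff/LearnQT | sirius_tasks/block4/task4_block4.py | sort_wagons
-- ===== SOURCE A (Python) =====
-- def sort_wagons(queue_w):
--     m = 1
--     stack = []  # аналог тупика для вагонов
--
--     for wag in queue_w:
--         stack.append(wag)
--
--         while stack[-1] == m:
--             m += 1
--             stack.pop()
--             if len(stack) == 0:
--                 break
--
--     for ost in stack[::-1]:
--         if ost == m:
--             stack.pop()
--             m += 1
--
--     return not stack
-- ===== SOURCE B (Python) =====
-- def sort_wagons(queue_w):
--     # B: pattern test instead of stack simulation.
--     # The wagons can be sorted through the dead end iff the queue is a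
--     # permutation of 1..n that avoids the 231 pattern.
--     n = len(queue_w)
--     if sorted(queue_w) != list(range(1, n + 1)):
--         return False
--     # suff[j] = min(queue_w[j:]) with an out-of-range sentinel n+1
--     suff = [n + 1] * (n + 1)
--     for j in range(n - 1, -1, -1):
--         suff[j] = min(queue_w[j], suff[j + 1])
--     # a 231 pattern i < j < k with p[k] < p[i] < p[j] makes sorting impossible
--     for i in range(n):
--         for j in range(i + 1, n):
--             if queue_w[i] < queue_w[j] and suff[j + 1] < queue_w[i]:
--                 return False
--     return True
-- ===== Notes on version B (the rewrite author's own statement) =====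
-- stated objective: alternative
-- what changed: B replaces A's live stack simulation (push each wagon, greedily pop matching targets, then drain the leftover stack) by a combinatorial characterization: the queue can be sorted iff it is a permutation of 1..n (checked via sorted(queue) == range) that avoids the 231 pattern, detected with a precomputed suffix-minimum array and a pairwise scan.
import Mathlib
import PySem

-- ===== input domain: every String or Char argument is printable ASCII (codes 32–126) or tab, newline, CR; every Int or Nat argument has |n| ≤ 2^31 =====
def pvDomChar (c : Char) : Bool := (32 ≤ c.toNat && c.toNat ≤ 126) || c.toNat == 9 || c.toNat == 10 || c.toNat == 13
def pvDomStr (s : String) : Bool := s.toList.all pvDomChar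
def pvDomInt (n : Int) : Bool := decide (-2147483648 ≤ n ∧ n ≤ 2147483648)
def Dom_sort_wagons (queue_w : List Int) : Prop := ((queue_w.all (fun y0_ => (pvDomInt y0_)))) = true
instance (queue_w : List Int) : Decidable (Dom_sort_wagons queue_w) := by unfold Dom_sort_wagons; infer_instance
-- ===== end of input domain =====

-- B tests the stack-sortability of the queue combinatorially (permutation of 1..n avoiding
-- the 231 pattern, via a suffix-minimum array) instead of simulating the dead-end stack.

-- ===== PORT A =====
-- the inner `while stack[-1] == m: m += 1; stack.pop(); if len(stack)==0: break`
-- (stack kept top-at-head; Python keeps the top at the list's end)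
def pvDrain : Int → List Int → Int × List Int
  | m, [] => (m, [])
  | m, t :: s => if t = m then pvDrain (m + 1) s else (m, t :: s)

-- the first `for wag in queue_w` loop: push, then drain
def pvPhase1 : Int → List Int → List Int → Int × List Int
  | m, s, [] => (m, s)
  | m, s, w :: q => let p := pvDrain m (w :: s); pvPhase1 p.1 p.2 q

-- the second loop `for ost in stack[::-1]` over a snapshot, popping the live stack on match
def pvPhase2 : Int → List Int → List Int → Int × List Int
  | m, cur, [] => (m, cur)
  | m, cur, ost :: rest =>
      if ost = m then pvPhase2 (m + 1) cur.tail rest else pvPhase2 m cur rest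

def sort_wagons (queue_w : List Int) : Bool :=
  let p := pvPhase1 1 [] queue_w
  let r := pvPhase2 p.1 p.2 p.2
  r.2.isEmpty

-- ===== PORT B =====
-- suffix minima with sentinel: pvSuff sent q = [min(q[j:], default sent) for j in 0..len(q)]
def pvSuff (sent : Int) : List Int → List Int
  | [] => [sent]
  | x :: xs => let r := pvSuff sent xs; min x (r.headD sent) :: r

-- inner j-loop: pairs (queue_w[j], suff[j+1])
def pvInner (x : Int) : List (Int × Int) → Bool
  | [] => false
  | (qj, sj) :: rest => (decide (x < qj) && decide (sj < x)) || pvInner x rest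

-- outer i-loop
def pvOuter : List (Int × Int) → Bool
  | [] => false
  | (qi, _) :: rest => pvInner qi rest || pvOuter rest

def sort_wagons_alt (queue_w : List Int) : Bool :=
  let n : Int := queue_w.length
  if PySem.List.sorted queue_w (fun x => x) false = PySem.List.pyRange 1 (n + 1) 1 then
    let suff := pvSuff (n + 1) queue_w
    !pvOuter (queue_w.zip suff.tail)
  else false

-- ===== PRECONDITION & SPEC =====
def Spec_sort_wagons (queue_w : List Int) (out : Bool) : Prop := out = sort_wagons_alt queue_w
instance (queue_w : List Int) (out : Bool) : Decidable (Spec_sort_wagons queue_w out) := by unfold Spec_sort_wagons; infer_instance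

-- ===== CLAIM (what is proved, stated in full; the proofs are below) =====
def Claim_equal_sort_wagons : Prop := ∀ (queue_w : List Int), Dom_sort_wagons queue_w → Spec_sort_wagons queue_w (sort_wagons queue_w)

-- ===== LEMMAS AND PROOFS =====

-- the run [m, m+1, ..., m+k-1]
def runL : Int → Nat → List Int
  | _, 0 => []
  | m, k + 1 => m :: runL (m + 1) k

-- the 231 pattern: i < j < k with q[k] < q[i] < q[j]
def listPat (q : List Int) : Prop :=
  ∃ u a v b w c r, q = u ++ (a :: (v ++ (b :: (w ++ (c :: r))))) ∧ c < a ∧ a < b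

theorem runL_append (a b : Nat) (m : Int) :
    runL m (a + b) = runL m a ++ runL (m + a) b := by
  induction a generalizing m with
  | zero => simp [runL]
  | succ a ih =>
      have : m + ((a : Int) + 1) = (m + 1) + a := by ring
      simp only [Nat.succ_add, runL, ih, List.cons_append]
      push_cast
      rw [this]

theorem mem_runL {x m : Int} {k : Nat} : x ∈ runL m k ↔ m ≤ x ∧ x < m + k := by
  induction k generalizing m with
  | zero => simp [runL]
  | succ k ih =>
      simp [runL, ih]
      constructor
      · rintro (rfl | ⟨h1, h2⟩) <;> omega
      · rintro ⟨h1, h2⟩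
        rcases eq_or_lt_of_le h1 with rfl | h
        · left; rfl
        · right; omega

theorem runL_pairwise (m : Int) (k : Nat) : (runL m k).Pairwise (· < ·) := by
  induction k generalizing m with
  | zero => simp [runL]
  | succ k ih =>
      simp only [runL, List.pairwise_cons]
      refine ⟨fun x hx => ?_, ih (m+1)⟩
      have := mem_runL.mp hx
      omega

theorem runL_length (m : Int) (k : Nat) : (runL m k).length = k := by
  induction k generalizing m with
  | zero => rfl
  | succ k ih => simp [runL, ih]

theorem drain_spec (s : List Int) (m : Int) :
    ∃ k : Nat, pvDrain m s = (m + k, s.drop k) ∧ s.take k = runL m k ∧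
      (s.drop k).head? ≠ some (m + k) := by
  induction s generalizing m with
  | nil => exact ⟨0, by simp [pvDrain, runL]⟩
  | cons t s ih =>
      by_cases h : t = m
      · subst h
        obtain ⟨k, h1, h2, h3⟩ := ih (t + 1)
        refine ⟨k + 1, ?_, ?_, ?_⟩
        · simpa [pvDrain, show t + ((k : Int) + 1) = t + 1 + k by ring] using h1
        · simpa [runL, h2]
        · push_cast
          simpa [show t + ((k : Int) + 1) = t + 1 + k by ring] using h3
      · exact ⟨0, by simp [pvDrain, h, runL], by simp [runL], by simp [h]⟩

theorem phase1_cons (m : Int) (s : List Int) (w : List Int) (x : Int) :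
    pvPhase1 m s (x :: w) = pvPhase1 (pvDrain m (x :: s)).1 (pvDrain m (x :: s)).2 w := rfl

theorem drain_noop {m x : Int} (s : List Int) (h : x ≠ m) :
    pvDrain m (x :: s) = (m, x :: s) := by simp [pvDrain, h]

theorem phase1_ms (q : List Int) (m : Int) (s : List Int) :
    ∃ k : Nat, (pvPhase1 m s q).1 = m + k ∧
      ((q : Multiset Int) + (s : Multiset Int)
        = ((pvPhase1 m s q).2 : Multiset Int) + (runL m k : Multiset Int)) := by
  induction q generalizing m s with
  | nil => exact ⟨0, by simp [pvPhase1], by simp [pvPhase1, runL, add_comm]⟩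
  | cons w q ih =>
      obtain ⟨j, hd, htk, -⟩ := drain_spec (w :: s) m
      obtain ⟨k, h1, h2⟩ := ih (m + j) ((w :: s).drop j)
      refine ⟨j + k, ?_, ?_⟩
      · rw [phase1_cons, hd]
        rw [h1]
        push_cast
        ring
      · rw [phase1_cons, hd]
        have hsplit : ((w :: s : List Int) : Multiset Int)
            = (runL m j : Multiset Int) + ((w :: s).drop j : Multiset Int) := by
          conv_lhs => rw [← List.take_append_drop j (w :: s)]
          rw [htk]
          simp
        have hrun : (runL m (j + k) : Multiset Int)
            = (runL m j : Multiset Int) + (runL (m + j) k : Multiset Int) := by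
          rw [runL_append]
          simp
        calc ((w :: q : List Int) : Multiset Int) + (s : Multiset Int)
            = ((q : List Int) : Multiset Int) + ((w :: s : List Int) : Multiset Int) := by
              simp
              exact List.perm_middle.symm
          _ = ((q : List Int) : Multiset Int) + ((w :: s).drop j : Multiset Int)
                + (runL m j : Multiset Int) := by rw [hsplit]; abel
          _ = ((pvPhase1 (m + j) ((w :: s).drop j) q).2 : Multiset Int)
                + (runL (m + j) k : Multiset Int) + (runL m j : Multiset Int) := by rw [h2]
          _ = _ := by rw [hrun]; abel

theorem phase1_deep (q : List Int) (m : Int) (s : List Int) :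
    ∃ (k d : Nat) (fresh : List Int),
      pvPhase1 m s q = (m + k, fresh ++ s.drop d) ∧ List.Sublist (s.take d) (runL m k) := by
  induction q generalizing m s with
  | nil => exact ⟨0, 0, [], by simp [pvPhase1], by simp [runL]⟩
  | cons w v ih =>
      obtain ⟨j, hd, htk, -⟩ := drain_spec (w :: s) m
      obtain ⟨k, d, fr, hp, hsub⟩ := ih (m + j) ((w :: s).drop j)
      cases j with
      | zero =>
          simp only [Nat.cast_zero, add_zero, List.drop_zero] at hd hp hsub
          cases d with
          | zero =>
              refine ⟨k, 0, fr ++ [w], ?_, by simp [runL]⟩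
              rw [phase1_cons, hd, hp]
              simp
          | succ dp =>
              refine ⟨k, dp, fr, ?_, ?_⟩
              · rw [phase1_cons, hd, hp]
                simp
              · have hws : List.Sublist (w :: s.take dp) (runL m k) := by
                  simpa using hsub
                exact List.sublist_of_cons_sublist hws
      | succ jp =>
          have hdrop : (w :: s).drop (jp + 1) = s.drop jp := by simp
          have htake : w :: s.take jp = runL m (jp + 1) := by simpa using htk
          refine ⟨jp + 1 + k, jp + d, fr, ?_, ?_⟩
          · rw [phase1_cons, hd, hp, hdrop, List.drop_drop]
            simp only [Prod.mk.injEq]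
            constructor
            · push_cast; omega
            · trivial
          · have hta : s.take (jp + d) = s.take jp ++ (s.drop jp).take d := by
              rw [← List.take_add]
            rw [hta]
            have h1 : runL m (jp + 1 + k) = runL m (jp + 1) ++ runL (m + (jp + 1 : Nat)) k := by
              rw [runL_append]
            rw [h1, ← htake]
            rw [hdrop] at hsub
            exact List.Sublist.append (List.sublist_cons_self _ _) hsub

theorem phase2_len (lst : List Int) (m : Int) (cur : List Int) :
    cur.length ≤ (pvPhase2 m cur lst).2.length + lst.length := by
  induction lst generalizing m cur with
  | nil => simp [pvPhase2]
  | cons ost rest ih =>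
      simp only [pvPhase2, List.length_cons]
      split
      · have h1 := ih (m + 1) cur.tail
        have ht : cur.length ≤ cur.tail.length + 1 := by
          cases cur <;> simp
        omega
      · have h1 := ih m cur
        omega

theorem phase2_run (k : Nat) (m : Int) : (pvPhase2 m (runL m k) (runL m k)).2 = [] := by
  induction k generalizing m with
  | zero => simp [runL, pvPhase2]
  | succ k ih => simpa [runL, pvPhase2] using ih (m + 1)

theorem phase2_empty_iff (s : List Int) (m : Int) :
    (pvPhase2 m s s).2 = [] ↔ s = runL m s.length := by
  constructor
  · intro h
    induction s generalizing m with
    | nil => rfl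
    | cons t rest ih =>
        by_cases ht : t = m
        · subst ht
          simp only [pvPhase2, if_pos rfl, List.tail_cons] at h
          have := ih (t + 1) h
          simp only [List.length_cons, runL]
          rw [← this]
        · simp only [pvPhase2, if_neg ht] at h
          have := phase2_len rest m (t :: rest)
          rw [h] at this
          simp at this
  · intro hs
    rw [hs]
    exact phase2_run _ _

theorem A_iff_run (q : List Int) :
    sort_wagons q = true ↔
      (pvPhase1 1 [] q).2 = runL (pvPhase1 1 [] q).1 (pvPhase1 1 [] q).2.length := by
  unfold sort_wagons
  rw [List.isEmpty_iff]
  exact phase2_empty_iff _ _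

theorem phase1_append (q1 q2 : List Int) (m : Int) (s : List Int) :
    pvPhase1 m s (q1 ++ q2) = pvPhase1 (pvPhase1 m s q1).1 (pvPhase1 m s q1).2 q2 := by
  induction q1 generalizing m s with
  | nil => simp [pvPhase1]
  | cons w q1 ih => simp only [List.cons_append, pvPhase1]; exact ih _ _

theorem phase1_target_le (q : List Int) (m : Int) (s : List Int) {c : Int}
    (hm : m ≤ c) (hq : c ∉ q) (hs : c ∉ s) : (pvPhase1 m s q).1 ≤ c := by
  obtain ⟨k, h1, h2⟩ := phase1_ms q m s
  by_contra hlt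
  rw [not_le] at hlt
  have hck : c ∈ runL m k := mem_runL.mpr ⟨hm, by omega⟩
  have hmem : c ∈ ((q : Multiset Int) + (s : Multiset Int)) := by
    rw [h2]
    exact Multiset.mem_add.mpr (Or.inr hck)
  rcases Multiset.mem_add.mp hmem with h | h
  · exact hq (by simpa using h)
  · exact hs (by simpa using h)

theorem split_two {α : Type} (t dr x y z : List α) (a b : α)
    (h : t ++ dr = x ++ (b :: (y ++ (a :: z)))) :
    List.Sublist [b, a] t ∨ (b ∈ t ∧ a ∈ dr) ∨ List.Sublist [b, a] dr := by
  induction t generalizing x with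
  | nil =>
      right; right
      simp only [List.nil_append] at h
      rw [h]
      refine List.sublist_append_of_sublist_right ?_
      refine List.Sublist.cons₂ b ?_
      refine List.sublist_append_of_sublist_right ?_
      exact List.Sublist.cons₂ a (List.nil_sublist z)
  | cons h0 t ih =>
      cases x with
      | nil =>
          simp only [List.nil_append, List.cons_append, List.cons.injEq] at h
          obtain ⟨rfl, h2⟩ := h
          have ha : a ∈ t ++ dr := by rw [h2]; simp
          rcases List.mem_append.mp ha with hx | hx
          · left
            exact List.Sublist.cons₂ h0 (List.singleton_sublist.mpr hx)
          · right; left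
            exact ⟨List.mem_cons_self, hx⟩
      | cons xh xp =>
          simp only [List.cons_append, List.cons.injEq] at h
          obtain ⟨rfl, h2⟩ := h
          rcases ih xp h2 with hx | hx | hx
          · exact Or.inl (hx.cons h0)
          · exact Or.inr (Or.inl ⟨List.mem_cons_of_mem _ hx.1, hx.2⟩)
          · exact Or.inr (Or.inr hx)

theorem A_perm_of_true {q : List Int} (h : sort_wagons q = true) :
    (q : Multiset Int) = (runL 1 q.length : Multiset Int) := by
  have hr := (A_iff_run q).mp h
  obtain ⟨k, h1, h2⟩ := phase1_ms q 1 []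
  simp only [Multiset.coe_nil, add_zero] at h2
  set j := (pvPhase1 1 [] q).2.length with hj
  rw [h1] at hr
  have hlen : q.length = k + j := by
    have hcard := congrArg Multiset.card h2
    simp [runL_length, ← hj] at hcard
    omega
  rw [hlen, h2, hr]
  rw [runL_append k j 1]
  simp [add_comm]

theorem A_false_of_pat {q : List Int}
    (hperm : (q : Multiset Int) = (runL 1 q.length : Multiset Int))
    (hpat : listPat q) : sort_wagons q = false := by
  obtain ⟨u, a, v, b, w, c, r, hq, hca, hab⟩ := hpat
  by_contra hfalse
  have htrue : sort_wagons q = true := by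
    cases hA : sort_wagons q
    · exact absurd hA hfalse
    · rfl
  have hqperm : List.Perm q (runL 1 q.length) := Multiset.coe_eq_coe.mp hperm
  have hnd : q.Nodup := by
    have hnr : (runL 1 q.length).Nodup :=
      ((runL_pairwise 1 q.length).imp (fun hlt => ne_of_lt hlt))
    exact hqperm.nodup_iff.mpr hnr
  have hcq : c ∈ q := by rw [hq]; simp
  have hc1 : 1 ≤ c := (mem_runL.mp (hqperm.subset hcq)).1
  rw [hq] at hnd
  obtain ⟨hu, hrest, hdU⟩ := List.nodup_append.mp hnd
  obtain ⟨-, hrest2⟩ := List.nodup_cons.mp hrest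
  obtain ⟨hv, hrest3, hdV⟩ := List.nodup_append.mp hrest2
  obtain ⟨-, hrest4⟩ := List.nodup_cons.mp hrest3
  obtain ⟨hw, -, hdW⟩ := List.nodup_append.mp hrest4
  have hcu : c ∉ u := fun hc => hdU c hc c (by simp) rfl
  have hcv : c ∉ v := fun hc => hdV c hc c (by simp) rfl
  have hcw : c ∉ w := fun hc => hdW c hc c (by simp) rfl
  -- stage 0 : A processes u
  set p0 := pvPhase1 1 [] u with hp0
  have hm0 : p0.1 ≤ c := phase1_target_le u 1 [] hc1 hcu (by simp)
  obtain ⟨k0, hk0, hms0⟩ := phase1_ms u 1 []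
  simp only [Multiset.coe_nil, add_zero] at hms0
  have hcs0 : c ∉ p0.2 := by
    intro hc
    have hmem : c ∈ ((p0.2 : List Int) : Multiset Int) + (runL 1 k0 : Multiset Int) :=
      Multiset.mem_add.mpr (Or.inl (by simpa using hc))
    rw [← hms0] at hmem
    exact hcu (by simpa using hmem)
  have hane : a ≠ p0.1 := by omega
  -- stage 1 : A processes v with a on the stack
  set p1 := pvPhase1 p0.1 (a :: p0.2) v with hp1
  have hcas : c ∉ a :: p0.2 := by
    intro hc
    rcases List.mem_cons.mp hc with heq | hc2
    · omega
    · exact hcs0 hc2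
  have hm1 : p1.1 ≤ c := phase1_target_le v p0.1 (a :: p0.2) hm0 hcv hcas
  obtain ⟨k1v, hk1, hms1⟩ := phase1_ms v p0.1 (a :: p0.2)
  obtain ⟨k1, d1, f1, hdp1, hsub1⟩ := phase1_deep v p0.1 (a :: p0.2)
  have hfst1 : p1.1 = p0.1 + (k1 : Int) := by rw [hp1, hdp1]
  have hd1 : d1 = 0 := by
    cases d1 with
    | zero => rfl
    | succ dp =>
        exfalso
        have hmemA : a ∈ (a :: p0.2).take (dp + 1) := by simp
        have har : a ∈ runL p0.1 k1 := hsub1.subset hmemA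
        have := (mem_runL.mp har).2
        omega
  subst hd1
  simp only [List.drop_zero] at hdp1
  have hs1 : p1.2 = f1 ++ a :: p0.2 := by rw [hp1, hdp1]
  have hcs1 : c ∉ p1.2 := by
    intro hc
    have hmem : c ∈ ((p1.2 : List Int) : Multiset Int) + (runL p0.1 k1v : Multiset Int) :=
      Multiset.mem_add.mpr (Or.inl (by simpa using hc))
    rw [← hms1] at hmem
    rcases Multiset.mem_add.mp hmem with h | h
    · exact hcv (by simpa using h)
    · exact hcas (by simpa using h)
  have hbne : b ≠ p1.1 := by omega
  -- stage 2 : A processes w with b above a on the stack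
  set p2 := pvPhase1 p1.1 (b :: p1.2) w with hp2
  have hcbs : c ∉ b :: p1.2 := by
    intro hc
    rcases List.mem_cons.mp hc with heq | hc2
    · omega
    · exact hcs1 hc2
  have hm2 : p2.1 ≤ c := phase1_target_le w p1.1 (b :: p1.2) hm1 hcw hcbs
  obtain ⟨k2, d2, f2, hdp2, hsub2⟩ := phase1_deep w p1.1 (b :: p1.2)
  have hfst2 : p2.1 = p1.1 + (k2 : Int) := by rw [hp2, hdp2]
  have hd2 : d2 = 0 := by
    cases d2 with
    | zero => rfl
    | succ dp =>
        exfalso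
        have hmemB : b ∈ (b :: p1.2).take (dp + 1) := by simp
        have hbr : b ∈ runL p1.1 k2 := hsub2.subset hmemB
        have := (mem_runL.mp hbr).2
        omega
  subst hd2
  simp only [List.drop_zero] at hdp2
  have hs2 : p2.2 = f2 ++ b :: p1.2 := by rw [hp2, hdp2]
  -- final stage : A processes c :: r
  set p3 := pvPhase1 p2.1 p2.2 (c :: r) with hp3
  obtain ⟨k3, d3, f3, hdp3, hsub3⟩ := phase1_deep (c :: r) p2.1 p2.2
  have hfst3 : p3.1 = p2.1 + (k3 : Int) := by rw [hp3, hdp3]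
  have hsnd3 : p3.2 = f3 ++ p2.2.drop d3 := by rw [hp3, hdp3]
  have hchain : pvPhase1 1 [] q = p3 := by
    have e1 : pvPhase1 1 [] q = pvPhase1 p0.1 p0.2 (a :: (v ++ b :: (w ++ c :: r))) := by
      rw [hq, phase1_append, ← hp0]
    have e2 : pvPhase1 p0.1 p0.2 (a :: (v ++ b :: (w ++ c :: r)))
        = pvPhase1 p0.1 (a :: p0.2) (v ++ b :: (w ++ c :: r)) := by
      rw [phase1_cons, drain_noop _ hane]
    have e3 : pvPhase1 p0.1 (a :: p0.2) (v ++ b :: (w ++ c :: r))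
        = pvPhase1 p1.1 p1.2 (b :: (w ++ c :: r)) := by
      rw [phase1_append, ← hp1]
    have e4 : pvPhase1 p1.1 p1.2 (b :: (w ++ c :: r))
        = pvPhase1 p1.1 (b :: p1.2) (w ++ c :: r) := by
      rw [phase1_cons, drain_noop _ hbne]
    have e5 : pvPhase1 p1.1 (b :: p1.2) (w ++ c :: r)
        = pvPhase1 p2.1 p2.2 (c :: r) := by
      rw [phase1_append, ← hp2]
    rw [e1, e2, e3, e4, e5, ← hp3]
  have hstar := (A_iff_run q).mp htrue
  rw [hchain] at hstar
  have hsplit := split_two (p2.2.take d3) (p2.2.drop d3) f2 f1 p0.2 a b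
    (by rw [List.take_append_drop, hs2, hs1])
  rcases hsplit with h | ⟨hb, ha⟩ | h
  · have hba : List.Sublist [b, a] (runL p2.1 k3) := h.trans hsub3
    have := (runL_pairwise p2.1 k3).sublist hba
    simp only [List.pairwise_cons, List.mem_cons] at this
    have hba2 := this.1 a (Or.inl rfl)
    omega
  · have hbr : b ∈ runL p2.1 k3 := hsub3.subset hb
    have hblt := (mem_runL.mp hbr).2
    have ham : a ∈ p3.2 := by rw [hsnd3]; exact List.mem_append.mpr (Or.inr ha)
    rw [hstar] at ham
    have := (mem_runL.mp ham).1
    omega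
  · have hdr : List.Sublist [b, a] p3.2 := by
      rw [hsnd3]
      exact h.trans (List.sublist_append_right _ _)
    rw [hstar] at hdr
    have := (runL_pairwise p3.1 p3.2.length).sublist hdr
    simp only [List.pairwise_cons, List.mem_cons] at this
    have hba2 := this.1 a (Or.inl rfl)
    omega

theorem left_inv (q : List Int)
    (hperm : (q : Multiset Int) = (runL 1 q.length : Multiset Int))
    (hnopat : ¬ listPat q) :
    ∀ rest : List Int, ∀ processed : List Int, ∀ k : Nat, ∀ s : List Int,
      q = processed ++ rest →
      ((processed : List Int) : Multiset Int) = (s : Multiset Int) + (runL 1 k : Multiset Int) →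
      s.Pairwise (· < ·) →
      s.head? ≠ some (1 + (k : Int)) →
      (pvPhase1 (1 + (k : Int)) s rest).2
        = runL (pvPhase1 (1 + (k : Int)) s rest).1 (pvPhase1 (1 + (k : Int)) s rest).2.length := by
  have hqperm : List.Perm q (runL 1 q.length) := Multiset.coe_eq_coe.mp hperm
  have hqnd : q.Nodup :=
    hqperm.nodup_iff.mpr ((runL_pairwise 1 q.length).imp (fun hlt => ne_of_lt hlt))
  have hbound : ∀ x ∈ q, 1 ≤ x ∧ x ≤ (q.length : Int) := by
    intro x hx
    have := mem_runL.mp (hqperm.subset hx)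
    omega
  intro rest
  induction rest with
  | nil =>
      intro processed k s h1 h2 h3 h4
      simp only [pvPhase1]
      rw [List.append_nil] at h1
      rw [← h1, hperm] at h2
      have hcard := congrArg Multiset.card h2
      simp [runL_length] at hcard
      have hk : k ≤ q.length := by omega
      have hgoal : (runL 1 q.length : Multiset Int)
          = (runL (1 + (k : Int)) (q.length - k) : Multiset Int)
            + (runL 1 k : Multiset Int) := by
        have := runL_append k (q.length - k) 1
        rw [Nat.add_sub_cancel' hk] at this
        rw [this]
        exact Multiset.coe_eq_coe.mpr List.perm_append_comm
      rw [hgoal] at h2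
      have hseq : (s : Multiset Int) = (runL (1 + (k : Int)) (q.length - k) : Multiset Int) :=
        add_right_cancel h2.symm
      have hpermS : List.Perm s (runL (1 + (k : Int)) (q.length - k)) :=
        Multiset.coe_eq_coe.mp hseq
      have heq : s = runL (1 + (k : Int)) (q.length - k) :=
        List.Perm.eq_of_pairwise (fun a b _ _ hab hba => ((lt_asymm hab) hba).elim)
          h3 (runL_pairwise _ _) hpermS
      have hlen : s.length = q.length - k := by
        rw [heq, runL_length]
      rw [hlen, heq]
  | cons w rest ih =>
      intro processed k s h1 h2 h3 h4
      have hwq : w ∈ q := by rw [h1]; simp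
      have hpnd : processed.Nodup := by
        rw [h1] at hqnd
        exact (List.nodup_append.mp hqnd).1
      have hdisj : ∀ y ∈ processed, ∀ z ∈ w :: rest, y ≠ z := by
        rw [h1] at hqnd
        exact (List.nodup_append.mp hqnd).2.2
      -- the pushed wagon goes under no smaller wagon: w is below the old top
      have hws : (w :: s).Pairwise (· < ·) := by
        cases s with
        | nil => simp
        | cons x sp =>
            have hxp : x ∈ processed := by
              have : x ∈ ((x :: sp : List Int) : Multiset Int) + (runL 1 k : Multiset Int) :=
                Multiset.mem_add.mpr (Or.inl (by simp))
              rw [← h2] at this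
              simpa using this
            have hxq : x ∈ q := by rw [h1]; exact List.mem_append.mpr (Or.inl hxp)
            have hne : x ≠ w := hdisj x hxp w (by simp)
            have hwx : w < x := by
              rcases lt_trichotomy w x with h | h | h
              · exact h
              · exact absurd h.symm hne
              · exfalso
                -- x < w would give the 231 pattern (x, w, 1+k)
                have hxr : x ∉ runL 1 k := by
                  intro hxr
                  have hc1 := List.nodup_iff_count_le_one.mp hpnd x
                  have hcnt : Multiset.count x ((processed : List Int) : Multiset Int)
                      = Multiset.count x ((x :: sp : List Int) : Multiset Int)
                        + Multiset.count x ((runL 1 k : List Int) : Multiset Int) := by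
                    rw [h2, Multiset.count_add]
                  have hc2 : 1 ≤ Multiset.count x ((x :: sp : List Int) : Multiset Int) :=
                    Multiset.one_le_count_iff_mem.mpr (by simp)
                  have hc3 : 1 ≤ Multiset.count x ((runL 1 k : List Int) : Multiset Int) :=
                    Multiset.one_le_count_iff_mem.mpr (by simpa using hxr)
                  have hc4 : Multiset.count x ((processed : List Int) : Multiset Int)
                      = processed.count x := by simp
                  omega
                have hx1 : 1 ≤ x := (hbound x hxq).1
                have hxk : ¬ (x < 1 + (k : Int)) := fun hlt => hxr (mem_runL.mpr ⟨hx1, by push_cast; omega⟩)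
                have hxm : x ≠ 1 + (k : Int) := fun heq => h4 (by simp [← heq])
                have hmx : 1 + (k : Int) < x := by omega
                have hmq : (1 + (k : Int)) ∈ q := by
                  have hxn := (hbound x hxq).2
                  have : (1 + (k : Int)) ∈ runL 1 q.length := mem_runL.mpr ⟨by omega, by omega⟩
                  exact hqperm.symm.subset this
                have hmp : (1 + (k : Int)) ∉ processed := by
                  intro hmp
                  have : (1 + (k : Int)) ∈ ((x :: sp : List Int) : Multiset Int)
                      + (runL 1 k : Multiset Int) := by
                    rw [← h2]; simpa using hmp
                  rcases Multiset.mem_add.mp this with hm | hm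
                  · have hm2 : (1 + (k : Int)) ∈ x :: sp := by simpa using hm
                    rcases List.mem_cons.mp hm2 with heq | hm3
                    · omega
                    · have := (List.pairwise_cons.mp h3).1 _ hm3
                      omega
                  · have hm2 : (1 + (k : Int)) ∈ runL 1 k := by simpa using hm
                    have := (mem_runL.mp hm2).2
                    omega
                have hmw : (1 + (k : Int)) ≠ w := by omega
                have hmr : (1 + (k : Int)) ∈ rest := by
                  have : (1 + (k : Int)) ∈ processed ++ w :: rest := by rw [← h1]; exact hmq
                  rcases List.mem_append.mp this with hm | hm
                  · exact absurd hm hmp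
                  · rcases List.mem_cons.mp hm with heq | hm2
                    · exact absurd heq hmw
                    · exact hm2
                obtain ⟨π1, π2, hπ⟩ := List.append_of_mem hxp
                obtain ⟨ρ1, ρ2, hρ⟩ := List.append_of_mem hmr
                exact hnopat ⟨π1, x, π2, w, ρ1, 1 + (k : Int), ρ2,
                  by rw [h1, hπ, hρ]; simp, hmx, h⟩
            refine List.pairwise_cons.mpr ⟨?_, h3⟩
            intro y hy
            rcases List.mem_cons.mp hy with rfl | hy2
            · exact hwx
            · exact lt_trans hwx ((List.pairwise_cons.mp h3).1 y hy2)
      obtain ⟨j, hd, htk, hh⟩ := drain_spec (w :: s) (1 + (k : Int))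
      have hstep : pvPhase1 (1 + (k : Int)) s (w :: rest)
          = pvPhase1 (1 + ((k + j : Nat) : Int)) ((w :: s).drop j) rest := by
        rw [phase1_cons, hd]
        have : 1 + (k : Int) + (j : Int) = 1 + ((k + j : Nat) : Int) := by push_cast; ring
        rw [this]
      rw [hstep]
      apply ih (processed ++ [w]) (k + j) ((w :: s).drop j)
      · rw [h1]; simp
      · have hsplitWS : ((w :: s : List Int) : Multiset Int)
            = (runL (1 + (k : Int)) j : Multiset Int) + ((w :: s).drop j : Multiset Int) := by
          conv_lhs => rw [← List.take_append_drop j (w :: s)]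
          rw [htk]
          simp
        have hrunsplit : (runL 1 ((k + j : Nat)) : Multiset Int)
            = (runL 1 k : Multiset Int) + (runL (1 + (k : Int)) j : Multiset Int) := by
          rw [runL_append k j 1]
          simp
        calc ((processed ++ [w] : List Int) : Multiset Int)
            = ((processed : List Int) : Multiset Int) + ({w} : Multiset Int) := rfl
          _ = (s : Multiset Int) + (runL 1 k : Multiset Int) + ({w} : Multiset Int) := by rw [h2]
          _ = ((w :: s : List Int) : Multiset Int) + (runL 1 k : Multiset Int) := by
              simp only [← Multiset.cons_coe, ← Multiset.singleton_add]
              abel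
          _ = ((w :: s).drop j : Multiset Int) + (runL 1 ((k + j : Nat)) : Multiset Int) := by
              rw [hsplitWS, hrunsplit]
              abel
      · exact hws.sublist (List.drop_sublist j (w :: s))
      · have hcast : 1 + ((k + j : Nat) : Int) = 1 + (k : Int) + (j : Int) := by push_cast; ring
        rw [hcast]
        exact hh

theorem A_true_of_good {q : List Int}
    (hperm : (q : Multiset Int) = (runL 1 q.length : Multiset Int))
    (hnopat : ¬ listPat q) : sort_wagons q = true := by
  have h := left_inv q hperm hnopat q [] 0 [] (by simp) (by simp [runL]) (by simp) (by simp)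
  rw [A_iff_run]
  simpa using h

theorem A_iff_cond (q : List Int) :
    sort_wagons q = true ↔
      ((q : Multiset Int) = (runL 1 q.length : Multiset Int) ∧ ¬ listPat q) := by
  constructor
  · intro h
    have hp := A_perm_of_true h
    refine ⟨hp, fun hpat => ?_⟩
    have := A_false_of_pat hp hpat
    rw [h] at this
    simp at this
  · rintro ⟨h1, h2⟩
    exact A_true_of_good h1 h2

theorem pyRange_eq_runL (n : Nat) :
    PySem.List.pyRange 1 ((n : Int) + 1) 1 = runL 1 n := by
  induction n with
  | zero =>
      simp only [Nat.cast_zero, zero_add]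
      rw [PySem.List.pyRange_one_eq_nil (by omega)]
      rfl
  | succ n ih =>
      have hb : (1 : Int) ≤ (n : Int) + 1 := by omega
      have hcast : ((n + 1 : Nat) : Int) + 1 = ((n : Int) + 1) + 1 := by push_cast; ring
      rw [hcast, PySem.List.pyRange_one_succ_right hb, ih]
      have hr : runL 1 (n + 1) = runL 1 n ++ runL (1 + (n : Int)) 1 := runL_append n 1 1
      rw [hr]
      have : runL (1 + (n : Int)) 1 = [(n : Int) + 1] := by
        simp [runL]
        ring
      rw [this]

theorem sorted_eq_iff (q : List Int) :
    (PySem.List.sorted q (fun x => x) false = PySem.List.pyRange 1 ((q.length : Int) + 1) 1)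
      ↔ ((q : Multiset Int) = (runL 1 q.length : Multiset Int)) := by
  rw [pyRange_eq_runL]
  constructor
  · intro h
    have hp : List.Perm (PySem.List.sorted q (fun x => x) false) q :=
      PySem.List.sorted_perm q (fun x => x) false
    rw [h] at hp
    exact Multiset.coe_eq_coe.mpr hp.symm
  · intro h
    exact PySem.List.sorted_eq_of_perm_of_pairwise_lt q (runL 1 q.length) (fun x => x)
      (Multiset.coe_eq_coe.mp h).symm (by simpa using runL_pairwise 1 q.length)

theorem pvSuff_shape (sent : Int) (l : List Int) :
    pvSuff sent l = ((pvSuff sent l).headD sent) :: (pvSuff sent l).tail := by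
  cases l <;> simp [pvSuff]

theorem suffHead_lt (l : List Int) (sent x : Int) :
    ((pvSuff sent l).headD sent < x) ↔ (sent < x ∨ ∃ c ∈ l, c < x) := by
  induction l with
  | nil => simp [pvSuff]
  | cons y ys ih =>
      simp only [pvSuff, List.headD_cons, min_lt_iff, ih, List.mem_cons]
      constructor
      · rintro (h | h | h)
        · exact Or.inr ⟨y, Or.inl rfl, h⟩
        · exact Or.inl h
        · obtain ⟨c, hc, hcx⟩ := h
          exact Or.inr ⟨c, Or.inr hc, hcx⟩
      · rintro (h | ⟨c, hc | hc, hcx⟩)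
        · exact Or.inr (Or.inl h)
        · subst hc; exact Or.inl hcx
        · exact Or.inr (Or.inr ⟨c, hc, hcx⟩)

theorem zip_suff_cons (sent y : Int) (ys : List Int) :
    (y :: ys).zip (pvSuff sent (y :: ys)).tail
      = (y, (pvSuff sent ys).headD sent) :: ys.zip (pvSuff sent ys).tail := by
  have h : (pvSuff sent (y :: ys)).tail = pvSuff sent ys := by simp [pvSuff]
  rw [h]
  conv_lhs => rw [pvSuff_shape sent ys]
  simp

theorem inner_iff (v : List Int) (x sent : Int) :
    pvInner x (v.zip (pvSuff sent v).tail) = true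
      ↔ ∃ ys b zs, v = ys ++ b :: zs ∧ x < b ∧ (sent < x ∨ ∃ c ∈ zs, c < x) := by
  induction v with
  | nil =>
      simp [pvInner]
  | cons y ys ih =>
      rw [zip_suff_cons]
      simp only [pvInner, Bool.or_eq_true, Bool.and_eq_true, decide_eq_true_eq]
      rw [ih]
      constructor
      · rintro (⟨hxy, hs⟩ | ⟨t, b, zs, heq, hxb, hcond⟩)
        · exact ⟨[], y, ys, rfl, hxy, (suffHead_lt ys sent x).mp hs⟩
        · exact ⟨y :: t, b, zs, by rw [heq]; rfl, hxb, hcond⟩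
      · rintro ⟨t, b, zs, heq, hxb, hcond⟩
        cases t with
        | nil =>
            simp only [List.nil_append, List.cons.injEq] at heq
            obtain ⟨rfl, rfl⟩ := heq
            exact Or.inl ⟨hxb, (suffHead_lt ys sent x).mpr hcond⟩
        | cons t0 ts =>
            simp only [List.cons_append, List.cons.injEq] at heq
            obtain ⟨rfl, heq2⟩ := heq
            exact Or.inr ⟨ts, b, zs, heq2, hxb, hcond⟩

theorem outer_iff (q : List Int) (sent : Int) :
    pvOuter (q.zip (pvSuff sent q).tail) = true
      ↔ ∃ us a vs, q = us ++ a :: vs ∧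
          (∃ ys b zs, vs = ys ++ b :: zs ∧ a < b ∧ (sent < a ∨ ∃ c ∈ zs, c < a)) := by
  induction q with
  | nil => simp [pvOuter]
  | cons y ys ih =>
      rw [zip_suff_cons]
      simp only [pvOuter, Bool.or_eq_true]
      rw [ih, inner_iff]
      constructor
      · rintro (⟨t, b, zs, heq, hxb, hcond⟩ | ⟨us, a, vs, heq, hin⟩)
        · exact ⟨[], y, ys, rfl, t, b, zs, heq, hxb, hcond⟩
        · exact ⟨y :: us, a, vs, by rw [heq]; rfl, hin⟩
      · rintro ⟨us, a, vs, heq, hin⟩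
        cases us with
        | nil =>
            simp only [List.nil_append, List.cons.injEq] at heq
            obtain ⟨rfl, rfl⟩ := heq
            exact Or.inl hin
        | cons u0 ut =>
            simp only [List.cons_append, List.cons.injEq] at heq
            obtain ⟨rfl, heq2⟩ := heq
            exact Or.inr ⟨ut, a, vs, heq2, hin⟩

theorem scan_iff_pat (q : List Int) (sent : Int) (hb : ∀ x ∈ q, x < sent) :
    pvOuter (q.zip (pvSuff sent q).tail) = true ↔ listPat q := by
  rw [outer_iff]
  constructor
  · rintro ⟨us, a, vs, heq, ys, b, zs, heq2, hab, hcond⟩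
    have haq : a ∈ q := by rw [heq]; simp
    rcases hcond with hs | ⟨c, hc, hca⟩
    · exact absurd hs (by have := hb a haq; omega)
    · obtain ⟨w1, w2, hzs⟩ := List.append_of_mem hc
      refine ⟨us, a, ys, b, w1, c, w2, ?_, hca, hab⟩
      rw [heq, heq2, hzs]
      try simp
  · rintro ⟨u, a, v, b, w, c, r, heq, hca, hab⟩
    exact ⟨u, a, v ++ b :: (w ++ c :: r), by rw [heq], v, b, w ++ c :: r,
      rfl, hab, Or.inr ⟨c, by simp, hca⟩⟩

theorem B_iff_cond (q : List Int) :
    sort_wagons_alt q = true ↔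
      ((q : Multiset Int) = (runL 1 q.length : Multiset Int) ∧ ¬ listPat q) := by
  have hdef : sort_wagons_alt q
      = (if PySem.List.sorted q (fun x => x) false
            = PySem.List.pyRange 1 ((q.length : Int) + 1) 1
         then !pvOuter (q.zip (pvSuff ((q.length : Int) + 1) q).tail)
         else false) := rfl
  rw [hdef]
  by_cases hs : PySem.List.sorted q (fun x => x) false
      = PySem.List.pyRange 1 ((q.length : Int) + 1) 1
  · have hperm := (sorted_eq_iff q).mp hs
    have hbnd : ∀ x ∈ q, x < (q.length : Int) + 1 := by
      intro x hx
      have := mem_runL.mp ((Multiset.coe_eq_coe.mp hperm).subset hx)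
      omega
    rw [if_pos hs]
    constructor
    · intro h
      refine ⟨hperm, fun hpat => ?_⟩
      have := (scan_iff_pat q _ hbnd).mpr hpat
      rw [this] at h
      simp at h
    · rintro ⟨-, hnopat⟩
      have : pvOuter (q.zip (pvSuff ((q.length : Int) + 1) q).tail) = false := by
        cases ho : pvOuter (q.zip (pvSuff ((q.length : Int) + 1) q).tail)
        · rfl
        · exact absurd ((scan_iff_pat q _ hbnd).mp ho) hnopat
      rw [this]
      rfl
  · rw [if_neg hs]
    constructor
    · intro h
      simp at h
    · rintro ⟨hperm, -⟩
      exact absurd ((sorted_eq_iff q).mpr hperm) hs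

-- ===== VERDICT (by name: the statement is the Claim_ definition above) =====
theorem sort_wagons_spec : Claim_equal_sort_wagons := by
  intro q _
  unfold Spec_sort_wagons
  have h1 := A_iff_cond q
  have h2 := B_iff_cond q
  cases hA : sort_wagons q <;> cases hB : sort_wagons_alt q <;> simp_all
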